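-- pv_equiv track=rewrite | github.com/rboulton/adventofcode | 2023/day12.py | variations
-- ===== SOURCE A (Python) =====
-- def variations(input):
--     pos = []
--     for i, ch in enumerate(input):
--         if ch == '?':
--             pos.append(i)
--     for i in range(2**len(pos)):
--         opts = ('0' * len(input) + bin(i)[2:])[-len(pos):]
--         chs = []
--         j = 0
--         for ch in input:
--             if ch == '?':
--                 if opts[j] == '1':
--                     ch = '#'
--                 else:
--                     ch = '.'
--                 j += 1
--             chs.append(ch)
--         yield(''.join(chs))
-- ===== SOURCE B (Python) =====
-- def variations(input):
--     # One scan splits the input at '?' into literal segments; then a backward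
--     # fold over the segments builds every completion by whole-segment string
--     # concatenation, instead of counting 0..2**k-1 in binary and rescanning
--     # the whole string character by character for each output.  '.' variants
--     # come before '#' variants at each '?', matching A's counting order
--     # (leftmost '?' most significant, 0 -> '.').
--     parts = []
--     cur = []
--     for ch in input:
--         if ch == '?':
--             parts.append(''.join(cur))
--             cur = []
--         else:
--             cur.append(ch)
--     outs = [''.join(cur)]
--     for part in reversed(parts):
--         outs = [part + '.' + t for t in outs] + [part + '#' + t for t in outs]
--     yield from outs
-- ===== Notes on version B (the rewrite author's own statement) =====
-- stated objective: faster
-- what changed: B splits the input once at '?' into literal segments and builds all completions by a backward fold with whole-segment concatenation, instead of A's counting 0..2**k-1 in binary, padding/slicing a bit string and rescanning the input character by character for every output.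
import Mathlib
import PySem

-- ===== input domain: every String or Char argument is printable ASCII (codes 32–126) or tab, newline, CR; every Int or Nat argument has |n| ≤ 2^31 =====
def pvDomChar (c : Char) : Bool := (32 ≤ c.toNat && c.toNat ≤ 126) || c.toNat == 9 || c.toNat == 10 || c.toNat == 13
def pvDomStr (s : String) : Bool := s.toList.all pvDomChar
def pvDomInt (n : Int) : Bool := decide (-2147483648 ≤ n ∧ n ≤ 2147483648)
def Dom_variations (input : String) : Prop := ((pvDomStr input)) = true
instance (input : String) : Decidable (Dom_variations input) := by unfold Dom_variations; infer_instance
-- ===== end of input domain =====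

-- B replaces A's binary-counting enumeration by a split-at-'?' backward fold
-- that concatenates whole literal segments; same outputs in the same order.
-- (A is a Python generator; both ports return the yielded strings as a list.)

-- ===== PORT A =====
-- port of bin(n)[2:] for n > 0 (binary digits, most significant first)
def binRec (n : Nat) : List Char :=
  if n = 0 then [] else binRec (n / 2) ++ [if n % 2 = 1 then '1' else '0']
decreasing_by exact Nat.div_lt_self (Nat.pos_of_ne_zero (by assumption)) one_lt_two

-- port of bin(i)[2:] (bin(0)[2:] = "0"); in A the loop index i is always ≥ 0
def binStr (n : Nat) : List Char := if n = 0 then ['0'] else binRec n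

def variations (input : String) : List String :=
  let cs := input.toList
  -- pos = []; for i, ch in enumerate(input): if ch == '?': pos.append(i)
  let pos : List Int :=
    (PySem.List.enumerate cs 0).foldl
      (fun acc p => if p.2 = '?' then acc ++ [p.1] else acc) []
  -- for i in range(2**len(pos)): … yield ''.join(chs)   (generator → list)
  (PySem.List.pyRange 0 ((2 : Int) ^ pos.length) 1).map (fun i =>
    -- opts = ('0' * len(input) + bin(i)[2:])[-len(pos):]
    let opts := PySem.List.slice (List.replicate cs.length '0' ++ binStr i.toNat)
                  (some (-(pos.length : Int))) none
    -- chs = []; j = 0; for ch in input: …  (opts[j] is always in range here)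
    let st := cs.foldl
      (fun (st : List Char × Nat) ch =>
        if ch = '?' then
          (st.1 ++ [if PySem.List.pyGetD opts (st.2 : Int) '0' = '1' then '#' else '.'],
           st.2 + 1)
        else (st.1 ++ [ch], st.2))
      (([] : List Char), 0)
    String.ofList st.1)

-- ===== PORT B =====
def variations_alt (input : String) : List String :=
  -- one scan: parts = segments before each '?', cur = trailing segment
  let st := input.toList.foldl
    (fun (st : List String × List Char) ch =>
      if ch = '?' then (st.1 ++ [String.ofList st.2], [])
      else (st.1, st.2 ++ [ch]))
    (([] : List String), ([] : List Char))
  -- outs = [''.join(cur)]; for part in reversed(parts): outs = […'.'…] + […'#'…]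
  st.1.reverse.foldl
    (fun outs part =>
      outs.map (fun t => part ++ "." ++ t) ++ outs.map (fun t => part ++ "#" ++ t))
    [String.ofList st.2]

-- ===== PRECONDITION & SPEC =====
def Spec_variations (input : String) (out : List String) : Prop := out = variations_alt input
instance (input : String) (out : List String) : Decidable (Spec_variations input out) := by unfold Spec_variations; infer_instance

-- ===== CLAIM (what is proved, stated in full; the proofs are below) =====
def Claim_equal_variations : Prop := ∀ (input : String), Dom_variations input → Spec_variations input (variations input)

-- ===== LEMMAS AND PROOFS =====

-- common normal form: all '?'-completions of cs, '.' before '#', as char lists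
def altGo : List Char → List (List Char)
  | [] => [[]]
  | c :: cs =>
    if c = '?' then (altGo cs).map ('.' :: ·) ++ (altGo cs).map ('#' :: ·)
    else (altGo cs).map (c :: ·)

def countQ (cs : List Char) : Nat := cs.countP (· = '?')

-- k-bit big-endian binary rendering of m (low bits of m only)
def bits (k m : Nat) : List Char :=
  (List.range k).reverse.map (fun j => if m / 2 ^ j % 2 = 1 then '1' else '0')

-- what A's inner loop computes from a list of binary digits
def rend : List Char → List Char → List Char
  | [], _ => []
  | c :: cs, bs =>
    if c = '?' then (if bs.headD '0' = '1' then '#' else '.') :: rend cs bs.tail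
    else c :: rend cs bs

theorem pos_foldl_length (l : List (Int × Char)) (acc : List Int) :
    (l.foldl (fun acc p => if p.2 = '?' then acc ++ [p.1] else acc) acc).length
      = acc.length + l.countP (fun p => p.2 = '?') := by
  induction l generalizing acc with
  | nil => simp
  | cons p t ih =>
    simp only [List.foldl_cons, List.countP_cons, ih]
    by_cases h : p.2 = '?' <;> simp [h] <;> omega

theorem countP_enumerate (cs : List Char) (s : Int) :
    (PySem.List.enumerate cs s).countP (fun p => p.2 = '?') = countQ cs := by
  induction cs generalizing s with
  | nil => simp [PySem.List.enumerate, countQ]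
  | cons c t ih =>
    simp only [PySem.List.enumerate, List.countP_cons, ih, countQ, decide_eq_true_eq]

theorem pyGetD_headD (opts : List Char) (j : Nat) :
    PySem.List.pyGetD opts (j : Int) '0' = (opts.drop j).headD '0' := by
  rw [PySem.List.pyGetD_natCast]
  rcases h : opts.drop j with _ | ⟨a, t⟩
  · simp [List.getD_eq_getElem?_getD, List.drop_eq_nil_iff.mp h]
  · have : opts[j]? = some a := by rw [← List.head?_drop, h]; rfl
    simp [List.getD_eq_getElem?_getD, this]

theorem inner_foldl (cs : List Char) (opts : List Char) (acc : List Char) (j : Nat) :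
    cs.foldl
      (fun (st : List Char × Nat) ch =>
        if ch = '?' then
          (st.1 ++ [if PySem.List.pyGetD opts (st.2 : Int) '0' = '1' then '#' else '.'],
           st.2 + 1)
        else (st.1 ++ [ch], st.2)) (acc, j)
    = (acc ++ rend cs (opts.drop j), j + countQ cs) := by
  induction cs generalizing acc j with
  | nil => simp [rend, countQ]
  | cons c t ih =>
    have hd : List.drop (j + 1) opts = (List.drop j opts).tail := by
      simp [List.tail_drop]
    by_cases h : c = '?'
    · rw [List.foldl_cons]
      simp only [h, if_pos rfl]
      rw [ih]
      simp only [if_true]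
      rw [hd, pyGetD_headD]
      simp [rend, countQ, List.countP_cons, Prod.ext_iff]
      omega
    · rw [List.foldl_cons]
      simp only [if_neg h]
      rw [ih]
      simp [rend, h, countQ, List.countP_cons, Prod.ext_iff]

theorem rend_take (cs bs : List Char) : rend cs bs = rend cs (bs.take (countQ cs)) := by
  induction cs generalizing bs with
  | nil => simp [rend]
  | cons c t ih =>
    by_cases h : c = '?'
    · rcases bs with _ | ⟨b, bs'⟩
      · simp [rend, h, countQ]
      · have hc : countQ ('?' :: t) = countQ t + 1 := by simp [countQ, List.countP_cons]
        subst h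
        rw [hc, List.take_succ_cons]
        simp only [rend, List.headD_cons, List.tail_cons]
        rw [ih]
        simp
    · have hc : countQ (c :: t) = countQ t := by simp [countQ, List.countP_cons, h]
      rw [hc]
      simp only [rend, if_neg h]
      rw [ih]

theorem bits_length (k m : Nat) : (bits k m).length = k := by simp [bits]

theorem bits_cons (k m : Nat) :
    bits (k + 1) m = (if m / 2 ^ k % 2 = 1 then '1' else '0') :: bits k m := by
  simp [bits, List.range_succ]

theorem bits_snoc (k m : Nat) :
    bits (k + 1) m = bits k (m / 2) ++ [if m % 2 = 1 then '1' else '0'] := by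
  rw [bits, List.range_succ_eq_map]
  simp only [List.reverse_cons, List.map_append, List.map_map, List.map_reverse]
  rw [bits]
  congr 1
  · rw [List.map_reverse]
    congr 1
    apply List.map_congr_left
    intro j _
    simp only [Function.comp_apply]
    have : m / 2 ^ (j + 1) = m / 2 / 2 ^ j := by
      rw [pow_succ, Nat.div_div_eq_div_mul, Nat.mul_comm]
    rw [this]
  · simp

theorem bits_drop (j w m : Nat) : (bits w m).drop j = bits (w - j) m := by
  rw [bits, bits, ← List.map_drop]
  congr 1
  rw [List.drop_reverse, List.take_range]
  simp [Nat.min_comm]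

theorem bits_pad (p k m : Nat) (h : m < 2 ^ k) :
    List.replicate p '0' ++ bits k m = bits (p + k) m := by
  induction p with
  | zero => simp
  | succ p ih =>
    have hlt : m < 2 ^ (p + k) := lt_of_lt_of_le h (Nat.pow_le_pow_right (by norm_num) (by omega))
    have : p + 1 + k = (p + k) + 1 := by omega
    rw [this, bits_cons, Nat.div_eq_of_lt hlt]
    rw [← ih]
    simp [List.replicate_succ]

theorem binRec_bits (n : Nat) (h : 0 < n) :
    binRec n = bits (binRec n).length n ∧ n < 2 ^ (binRec n).length := by
  induction n using Nat.strong_induction_on with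
  | _ n ih =>
    by_cases h2 : n / 2 = 0
    · have hn : n = 1 := by omega
      subst hn
      simp [binRec, bits, List.range_succ]
    · obtain ⟨ih1, ih2⟩ := ih (n / 2) (Nat.div_lt_self h one_lt_two) (Nat.pos_of_ne_zero h2)
      rw [binRec, if_neg (by omega : ¬ n = 0)]
      have hlen : (binRec (n / 2) ++ [if n % 2 = 1 then '1' else '0']).length
          = (binRec (n / 2)).length + 1 := by simp
      rw [hlen]
      constructor
      · rw [bits_snoc, ← ih1]
      · rw [pow_succ]
        have h3 := Nat.div_add_mod n 2
        have h4 := Nat.mod_lt n (show 0 < 2 by norm_num)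
        omega

theorem binStr_bits (n : Nat) :
    binStr n = bits (binStr n).length n ∧ n < 2 ^ (binStr n).length := by
  by_cases h : n = 0
  · subst h; constructor <;> simp [binStr, bits, List.range_succ]
  · simp only [binStr, if_neg h]
    exact binRec_bits n (Nat.pos_of_ne_zero h)

theorem bits_add_pow (k r : Nat) : bits k (2 ^ k + r) = bits k r := by
  rw [bits, bits]
  apply List.map_congr_left
  intro j hj
  rw [List.mem_reverse, List.mem_range] at hj
  have h1 : 2 ^ k = 2 ^ j * 2 ^ (k - j) := by rw [← pow_add]; congr 1; omega
  have h2 : (2 ^ k + r) / 2 ^ j = 2 ^ (k - j) + r / 2 ^ j := by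
    rw [h1, Nat.mul_add_div (by positivity)]
  rw [h2]
  obtain ⟨q, hq⟩ : 2 ∣ 2 ^ (k - j) := dvd_pow_self 2 (by omega)
  rw [hq]
  have h5 : (2 * q + r / 2 ^ j) % 2 = r / 2 ^ j % 2 := by omega
  rw [h5]

theorem opts_eq_bits (k n m : Nat) (hm : m < 2 ^ k) (hk : 0 < k) (hkn : k ≤ n) :
    PySem.List.slice (List.replicate n '0' ++ binStr m) (some (-(k : Int))) none
      = bits k m := by
  rw [PySem.List.slice_from_neg_natCast _ _ hk]
  obtain ⟨hb, hlt⟩ := binStr_bits m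
  have hx : List.replicate n '0' ++ binStr m = bits (n + (binStr m).length) m := by
    nth_rewrite 1 [hb]
    exact bits_pad n (binStr m).length m hlt
  rw [hx, bits_drop, bits_length]
  congr 1
  omega

theorem range_map_rend (cs : List Char) :
    (List.range (2 ^ countQ cs)).map (fun j => rend cs (bits (countQ cs) j)) = altGo cs := by
  induction cs with
  | nil => simp [countQ, altGo, rend]
  | cons c t ih =>
    by_cases h : c = '?'
    · subst h
      have hk : countQ ('?' :: t) = countQ t + 1 := by simp [countQ]
      rw [hk]
      have hsplit : 2 ^ (countQ t + 1) = 2 ^ countQ t + 2 ^ countQ t := by ring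
      rw [hsplit, List.range_add, List.map_append, List.map_map]
      have h1 : (List.range (2 ^ countQ t)).map (fun j => rend ('?' :: t) (bits (countQ t + 1) j))
          = (altGo t).map ('.' :: ·) := by
        rw [← ih, List.map_map]
        apply List.map_congr_left
        intro j hj
        rw [List.mem_range] at hj
        rw [bits_cons, Nat.div_eq_of_lt hj]
        simp [rend]
      have h2 : (List.range (2 ^ countQ t)).map
            ((fun j => rend ('?' :: t) (bits (countQ t + 1) j)) ∘ (fun j => 2 ^ countQ t + j))
          = (altGo t).map ('#' :: ·) := by
        rw [← ih, List.map_map]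
        apply List.map_congr_left
        intro r hr
        rw [List.mem_range] at hr
        simp only [Function.comp_apply]
        rw [bits_cons]
        have hdiv : (2 ^ countQ t + r) / 2 ^ countQ t = 1 := by
          rw [Nat.add_comm, Nat.add_div_right _ (by positivity), Nat.div_eq_of_lt hr]
        rw [hdiv, bits_add_pow]
        simp [rend]
      rw [h1, h2]
      simp [altGo]
    · have hk : countQ (c :: t) = countQ t := by simp [countQ, h]
      rw [hk]
      simp only [altGo, if_neg h]
      rw [← ih, List.map_map]
      apply List.map_congr_left
      intro j hj
      simp [rend, h]

theorem variations_norm (input : String) :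
    variations input = (altGo input.toList).map String.ofList := by
  simp only [variations]
  have hlen : ((PySem.List.enumerate input.toList 0).foldl
      (fun acc p => if p.2 = '?' then acc ++ [p.1] else acc) ([] : List Int)).length
      = countQ input.toList := by
    rw [pos_foldl_length, countP_enumerate]
    simp
  rw [hlen]
  have hr : PySem.List.pyRange 0 ((2 : Int) ^ countQ input.toList) 1
      = (List.range (2 ^ countQ input.toList)).map (fun k : Nat => (k : Int)) := by
    rw [PySem.List.pyRange_one]
    rw [sub_zero, show ((2 : Int) ^ countQ input.toList) = ((2 ^ countQ input.toList : Nat) : Int) by push_cast; ring,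
      Int.toNat_natCast]
    apply List.map_congr_left
    intro j _
    simp
  rw [hr, List.map_map, ← range_map_rend, List.map_map]
  apply List.map_congr_left
  intro j hj
  rw [List.mem_range] at hj
  simp only [Function.comp_apply]
  rw [inner_foldl input.toList _ [] 0]
  simp only [List.drop_zero, List.nil_append, Int.toNat_natCast]
  congr 1
  by_cases hk : countQ input.toList = 0
  · rw [rend_take input.toList, rend_take input.toList (bits (countQ input.toList) j), hk]
    simp
  · rw [opts_eq_bits (countQ input.toList) input.toList.length j hj (Nat.pos_of_ne_zero hk)
      List.countP_le_length]

theorem ofList_dot (a b : List Char) :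
    String.ofList a ++ "." ++ String.ofList b = String.ofList (a ++ '.' :: b) := by
  rw [← String.ofList_toList (s := String.ofList a ++ "." ++ String.ofList b)]
  congr 1
  simp

theorem ofList_hash (a b : List Char) :
    String.ofList a ++ "#" ++ String.ofList b = String.ofList (a ++ '#' :: b) := by
  rw [← String.ofList_toList (s := String.ofList a ++ "#" ++ String.ofList b)]
  congr 1
  simp

theorem alt_pipe (cs : List Char) (parts : List String) (cur : List Char) :
    (let st := cs.foldl
        (fun (st : List String × List Char) ch =>
          if ch = '?' then (st.1 ++ [String.ofList st.2], [])
          else (st.1, st.2 ++ [ch])) (parts, cur)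
     st.1.reverse.foldl
       (fun outs part =>
         outs.map (fun t => part ++ "." ++ t) ++ outs.map (fun t => part ++ "#" ++ t))
       [String.ofList st.2])
    = parts.reverse.foldl
        (fun outs part =>
          outs.map (fun t => part ++ "." ++ t) ++ outs.map (fun t => part ++ "#" ++ t))
        ((altGo cs).map (fun t => String.ofList (cur ++ t))) := by
  induction cs generalizing parts cur with
  | nil => simp [altGo]
  | cons c t ih =>
    by_cases h : c = '?'
    · subst h
      simp only [List.foldl_cons, if_pos rfl, if_true]
      rw [ih]
      rw [List.reverse_append, List.reverse_singleton, List.singleton_append, List.foldl_cons]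
      congr 1
      simp only [altGo, if_pos rfl, if_true, List.map_append, List.map_map]
      congr 1 <;> apply List.map_congr_left <;> intro s _ <;>
        simp [Function.comp, ofList_dot, ofList_hash]
    · simp only [List.foldl_cons, if_neg h]
      rw [ih]
      congr 1
      simp only [altGo, if_neg h, List.map_map]
      apply List.map_congr_left
      intro s _
      simp

theorem alt_norm (input : String) :
    variations_alt input = (altGo input.toList).map String.ofList := by
  have h := alt_pipe input.toList [] []
  simp only [List.reverse_nil, List.foldl_nil, List.nil_append] at h
  simpa [variations_alt] using h

-- ===== VERDICT (by name: the statement is the Claim_ definition above) =====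
theorem variations_spec : Claim_equal_variations := by
  intro input _
  unfold Spec_variations
  rw [variations_norm, alt_norm]
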